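-- pv_equiv track=rewrite | github.com/Zenysis/Harmony | scripts/field_setup/process_indicator_metadata.py | sort_indicators
-- ===== SOURCE A (Python) =====
-- def sort_indicators(indicators):
--     # HACK(moriah): we need to build the non-composite indicator
--     # calculations first so that when we build the composite calculations the
--     # children actually have calculations. If we do this by sorting a groups indicator
--     # then all of the composites indicators need to be in the same group.
--     # This is true by default for dhis2 indicators but may change for other datasources
--     composites, regular = [], []
--     for indicator in indicators:
--         if indicator.get('type') == 'COMPOSITE':
--             composites.append(indicator)
--         else:
--             regular.append(indicator)
--     return regular + composites
-- ===== SOURCE B (Python) =====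
-- def sort_indicators(indicators):
--     # Single stable sort: regular indicators (key False) stay before composites (key True),
--     # each group keeping its original order.
--     return sorted(indicators, key=lambda indicator: indicator.get('type') == 'COMPOSITE')
-- ===== Notes on version B (the rewrite author's own statement) =====
-- stated objective: idiomatic
-- what changed: Replaced the explicit two-bucket partition loop and list concatenation with a single stable sorted() call keyed on the boolean 'is composite', relying on sort stability to keep each group's original order.
import Mathlib
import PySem

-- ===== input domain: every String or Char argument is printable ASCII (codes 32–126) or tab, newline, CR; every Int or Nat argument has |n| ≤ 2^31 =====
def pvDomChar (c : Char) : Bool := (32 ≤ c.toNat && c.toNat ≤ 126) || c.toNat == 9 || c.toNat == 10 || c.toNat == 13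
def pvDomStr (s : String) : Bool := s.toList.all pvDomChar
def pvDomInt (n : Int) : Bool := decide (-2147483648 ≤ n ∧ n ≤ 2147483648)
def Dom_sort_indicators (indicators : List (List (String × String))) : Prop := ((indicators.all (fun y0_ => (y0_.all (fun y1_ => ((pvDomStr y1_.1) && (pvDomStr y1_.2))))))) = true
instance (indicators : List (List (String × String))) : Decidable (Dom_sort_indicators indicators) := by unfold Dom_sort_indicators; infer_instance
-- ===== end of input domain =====

-- B replaces A's two-bucket partition loop with a single stable sort on the boolean
-- "is composite" key (more idiomatic, same result).


-- ===== PORT A =====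
-- indicator.get('type') == 'COMPOSITE'  (dict.get: first match; missing key → none ≠ some "COMPOSITE")
def pvIsComposite (indicator : List (String × String)) : Bool :=
  PySem.Dict.get? (PySem.Dict.mk indicator) "type" == some "COMPOSITE"

def sort_indicators (indicators : List (List (String × String))) : List (List (String × String)) :=
  -- composites, regular = [], []; for indicator in indicators: append to one of them
  let p := indicators.foldl
    (fun (acc : List (List (String × String)) × List (List (String × String))) indicator =>
      if pvIsComposite indicator then (acc.1 ++ [indicator], acc.2)
      else (acc.1, acc.2 ++ [indicator]))
    ([], [])
  p.2 ++ p.1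

-- ===== PORT B =====
def sort_indicators_alt (indicators : List (List (String × String))) : List (List (String × String)) :=
  PySem.List.sorted indicators (fun indicator => pvIsComposite indicator) false

-- ===== PRECONDITION & SPEC =====
def Spec_sort_indicators (indicators : List (List (String × String))) (out : List (List (String × String))) : Prop := out = sort_indicators_alt indicators
instance (indicators : List (List (String × String))) (out : List (List (String × String))) : Decidable (Spec_sort_indicators indicators out) := by unfold Spec_sort_indicators; infer_instance

-- ===== CLAIM (what is proved, stated in full; the proofs are below) =====
def Claim_equal_sort_indicators : Prop := ∀ (indicators : List (List (String × String))), Dom_sort_indicators indicators → Spec_sort_indicators indicators (sort_indicators indicators)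

-- ===== LEMMAS AND PROOFS =====

-- insertBy passes over a prefix it is never 'before'
theorem pv_insertBy_append {α : Type} (before : α → α → Bool) (x : α) (r c : List α)
    (hr : ∀ y ∈ r, before x y = false) :
    PySem.List.insertBy before x (r ++ c) = r ++ PySem.List.insertBy before x c := by
  induction r with
  | nil => simp
  | cons a r ih =>
    have ha : before x a = false := hr a (by simp)
    simp [PySem.List.insertBy, ha, ih (fun y hy => hr y (by simp [hy]))]

-- insertBy appends at the end when it is never 'before'
theorem pv_insertBy_last {α : Type} (before : α → α → Bool) (x : α) (l : List α)
    (hl : ∀ y ∈ l, before x y = false) :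
    PySem.List.insertBy before x l = l ++ [x] := by
  induction l with
  | nil => simp [PySem.List.insertBy]
  | cons a l ih =>
    have ha : before x a = false := hl a (by simp)
    simp [PySem.List.insertBy, ha, ih (fun y hy => hl y (by simp [hy]))]

-- Bool key comparison: decide (a < b) on Bool
theorem pv_decide_bool_lt (a b : Bool) : decide (a < b) = (!a && b) := by
  cases a <;> cases b <;> decide

-- insertion-sort invariant for a Bool key: the accumulator stays "falses ++ trues"
theorem pv_loop {α : Type} (key : α → Bool) (xs r c : List α)
    (hr : ∀ y ∈ r, key y = false) (hc : ∀ y ∈ c, key y = true) :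
    xs.foldl (fun acc x => PySem.List.insertBy (fun a b => decide (key a < key b)) x acc) (r ++ c)
      = (r ++ xs.filter (fun x => !key x)) ++ (c ++ xs.filter key) := by
  induction xs generalizing r c with
  | nil => simp
  | cons x xs ih =>
    by_cases hx : key x = true
    · have hstep : PySem.List.insertBy (fun a b => decide (key a < key b)) x (r ++ c)
          = r ++ (c ++ [x]) := by
        have hall : ∀ y ∈ r ++ c, decide (key x < key y) = false := by
          intro y _
          rw [pv_decide_bool_lt, hx]
          simp
        rw [pv_insertBy_last _ x (r ++ c) hall]
        simp
      have hc' : ∀ y ∈ c ++ [x], key y = true := by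
        intro y hy
        rcases List.mem_append.mp hy with h | h
        · exact hc y h
        · simp at h
          subst h
          exact hx
      simp only [List.foldl_cons, hstep, ih r (c ++ [x]) hr hc']
      simp [hx]
    · have hx' : key x = false := by simpa using hx
      have hstep : PySem.List.insertBy (fun a b => decide (key a < key b)) x (r ++ c)
          = (r ++ [x]) ++ c := by
        have hfr : ∀ y ∈ r, decide (key x < key y) = false := by
          intro y hy
          rw [pv_decide_bool_lt, hx', hr y hy]
          simp
        rw [pv_insertBy_append _ x r c hfr]
        cases c with
        | nil => simp [PySem.List.insertBy]
        | cons d c' =>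
          have hd : key d = true := hc d (by simp)
          simp [PySem.List.insertBy, hx', hd]
      have hr' : ∀ y ∈ r ++ [x], key y = false := by
        intro y hy
        rcases List.mem_append.mp hy with h | h
        · exact hr y h
        · simp at h
          subst h
          exact hx'
      simp only [List.foldl_cons, hstep, ih (r ++ [x]) c hr' hc]
      simp [hx']

-- A's partition loop computes (composites so far, regulars so far)
theorem pv_partition (xs : List (List (String × String)))
    (cs rs : List (List (String × String))) :
    xs.foldl
      (fun (acc : List (List (String × String)) × List (List (String × String))) indicator =>
        if pvIsComposite indicator then (acc.1 ++ [indicator], acc.2)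
        else (acc.1, acc.2 ++ [indicator])) (cs, rs)
      = (cs ++ xs.filter pvIsComposite, rs ++ xs.filter (fun x => !pvIsComposite x)) := by
  induction xs generalizing cs rs with
  | nil => simp
  | cons x xs ih =>
    by_cases hx : pvIsComposite x = true
    · simp [hx, ih]
    · have hx' : pvIsComposite x = false := by simpa using hx
      simp [hx', ih]

-- ===== VERDICT (by name: the statement is the Claim_ definition above) =====
theorem sort_indicators_spec : Claim_equal_sort_indicators := by
  intro indicators _
  unfold Spec_sort_indicators sort_indicators sort_indicators_alt
  rw [PySem.List.sorted_eq_foldl_insertBy]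
  have h := pv_loop pvIsComposite indicators [] [] (by simp) (by simp)
  simp only [List.nil_append] at h
  rw [h, pv_partition indicators [] []]
  simp
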